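-- pv_equiv track=rewrite | github.com/Lightning-AI/pytorch-lightning | src/lightning/fabric/accelerators/cuda.py | _transform_uuid_to_ordinals
-- ===== SOURCE A (Python) =====
-- from typing import cast, Dict, Generator, List, Optional, Union
--
-- def _transform_uuid_to_ordinals(candidates: List[str], uuids: List[str]) -> List[int]:
--     """Given the set of partial uuids and list of known uuids builds a set of ordinals excluding ambiguous partials
--     IDs."""
--
--     def uuid_to_orinal(candidate: str, uuids: List[str]) -> int:
--         best_match = -1
--         for idx, uuid in enumerate(uuids):
--             if not uuid.startswith(candidate):
--                 continue
--             # Ambigous candidate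
--             if best_match != -1:
--                 return -1
--             best_match = idx
--         return best_match
--
--     rc: List[int] = []
--     for candidate in candidates:
--         idx = uuid_to_orinal(candidate, uuids)
--         # First invalid ordinal stops parsing
--         if idx < 0:
--             break
--         # Duplicates result in empty set
--         if idx in rc:
--             return cast(List[int], [])
--         rc.append(idx)
--     return rc
-- ===== SOURCE B (Python) =====
-- def _transform_uuid_to_ordinals(candidates, uuids):
--     # Sort the uuids once (keeping original positions); for each candidate the
--     # uuids starting with it form a contiguous block [lo, hi) of the sorted
--     # order, found by binary search: unique match iff hi - lo == 1.
--     pairs = sorted(enumerate(uuids), key=lambda p: p[1])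
--     keys = [u for _, u in pairs]
--
--     def bisect_left(ks, x):
--         lo, hi = 0, len(ks)
--         while lo < hi:
--             mid = (lo + hi) // 2
--             if ks[mid] < x:
--                 lo = mid + 1
--             else:
--                 hi = mid
--         return lo
--
--     rc = []
--     for candidate in candidates:
--         lo = bisect_left(keys, candidate)
--         hi = bisect_left(keys, candidate + "\x7f")
--         if hi - lo != 1:
--             break
--         idx = pairs[lo][0]
--         if idx in rc:
--             return []
--         rc.append(idx)
--     return rc
-- ===== Notes on version B (the rewrite author's own statement) =====
-- stated objective: alternative
-- what changed: B sorts the uuids once with their original positions and binary-searches the prefix range [bisect(candidate), bisect(candidate+chr(127))) per candidate (unique match iff the range has length 1), replacing A's linear scan of all uuids for every candidate; it trades an upfront O(U log U) sort for O(log U) per candidate instead of O(U).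
import Mathlib
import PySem

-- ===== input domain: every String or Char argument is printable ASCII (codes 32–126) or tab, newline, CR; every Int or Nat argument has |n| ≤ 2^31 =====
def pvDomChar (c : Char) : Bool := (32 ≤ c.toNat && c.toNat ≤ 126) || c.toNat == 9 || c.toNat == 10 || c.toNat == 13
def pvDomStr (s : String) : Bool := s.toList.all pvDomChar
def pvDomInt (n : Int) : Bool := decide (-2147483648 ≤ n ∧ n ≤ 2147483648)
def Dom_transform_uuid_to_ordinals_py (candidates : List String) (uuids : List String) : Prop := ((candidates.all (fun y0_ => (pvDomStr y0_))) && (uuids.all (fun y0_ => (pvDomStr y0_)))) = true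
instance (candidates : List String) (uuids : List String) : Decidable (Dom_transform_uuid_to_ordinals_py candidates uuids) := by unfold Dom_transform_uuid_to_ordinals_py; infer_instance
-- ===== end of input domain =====

-- B sorts the uuids once with their original positions and binary-searches the contiguous
-- prefix block [bisect(c), bisect(c+chr(127))) per candidate instead of A's linear scan of
-- all uuids for every candidate (objective: alternative algorithm, same return value).

-- ===== PORT A =====
-- inner helper `uuid_to_orinal`: scan enumerate(uuids) keeping best_match, early return -1 on ambiguity
def uuidToOrdinalLoop (candidate : String) : List (Int × String) → Int → Int
  | [], best => best
  | (idx, uuid) :: rest, best =>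
    if !(PySem.Str.startswith uuid candidate) then uuidToOrdinalLoop candidate rest best
    else if best ≠ -1 then -1
    else uuidToOrdinalLoop candidate rest idx

-- outer loop over candidates with accumulator rc
def transformLoopA (uuids : List String) : List String → List Int → List Int
  | [], rc => rc
  | candidate :: rest, rc =>
    let idx := uuidToOrdinalLoop candidate (PySem.List.enumerate uuids 0) (-1)
    if idx < 0 then rc
    else if rc.contains idx then []
    else transformLoopA uuids rest (rc ++ [idx])

def transform_uuid_to_ordinals_py (candidates : List String) (uuids : List String) : List Int :=
  transformLoopA uuids candidates []

-- ===== PORT B =====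
-- Source B's hand-written bisect_left: the lo/hi halving while-loop, fuel = len(keys)
-- (an over-approximation of the iteration count; hi - lo shrinks every turn)
def bisectLoopB (keys : List String) (x : String) : Nat → Nat → Nat → Nat
  | 0, lo, _ => lo
  | fuel+1, lo, hi =>
    if lo < hi then
      if keys.getD ((lo + hi) / 2) "" < x then bisectLoopB keys x fuel ((lo + hi) / 2 + 1) hi
      else bisectLoopB keys x fuel lo ((lo + hi) / 2)
    else lo

def bisectB (keys : List String) (x : String) : Nat :=
  bisectLoopB keys x keys.length 0 keys.length

-- the candidate loop: break when the block [lo, hi) has length ≠ 1, empty result on duplicate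
def loopB (pairs : List (Int × String)) (keys : List String) : List String → List Int → List Int
  | [], rc => rc
  | c :: rest, rc =>
    let lo := bisectB keys c
    let hi := bisectB keys (c ++ "\x7F")
    if (hi : Int) - (lo : Int) ≠ 1 then rc
    else
      let idx := (pairs.getD lo ((0 : Int), "")).1
      if rc.contains idx then []
      else loopB pairs keys rest (rc ++ [idx])

def transform_uuid_to_ordinals_py_alt (candidates : List String) (uuids : List String) : List Int :=
  let pairs := PySem.List.sorted (PySem.List.enumerate uuids 0) (fun p => p.2) false
  let keys := pairs.map (fun p => p.2)
  loopB pairs keys candidates []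

-- ===== PRECONDITION & SPEC =====
def Spec_transform_uuid_to_ordinals_py (candidates : List String) (uuids : List String) (out : List Int) : Prop := out = transform_uuid_to_ordinals_py_alt candidates uuids
instance (candidates : List String) (uuids : List String) (out : List Int) : Decidable (Spec_transform_uuid_to_ordinals_py candidates uuids out) := by unfold Spec_transform_uuid_to_ordinals_py; infer_instance

-- ===== CLAIM (what is proved, stated in full; the proofs are below) =====
def Claim_equal_transform_uuid_to_ordinals_py : Prop := ∀ (candidates : List String) (uuids : List String), Dom_transform_uuid_to_ordinals_py candidates uuids → Spec_transform_uuid_to_ordinals_py candidates uuids (transform_uuid_to_ordinals_py candidates uuids)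

-- ===== LEMMAS AND PROOFS =====

-- once best_match is set (≠ -1), A's inner loop returns best iff no further match occurs
theorem uuidToOrdinalLoop_of_ne (candidate : String) (l : List (Int × String)) (best : Int)
    (hb : best ≠ -1) :
    uuidToOrdinalLoop candidate l best =
      if l.filter (fun p => PySem.Str.startswith p.2 candidate) = [] then best else -1 := by
  induction l with
  | nil => simp [uuidToOrdinalLoop]
  | cons p rest ih =>
    obtain ⟨idx, uuid⟩ := p
    simp only [uuidToOrdinalLoop, List.filter_cons]
    by_cases h : PySem.Str.startswith uuid candidate
    · rw [h]
      rw [if_neg (by simp), if_pos hb, if_neg (by simp)]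
    · rw [Bool.not_eq_true] at h
      rw [h]
      simp only [Bool.not_false, Bool.false_eq_true, if_true, if_false]
      exact ih

-- A's inner loop from best = -1 computes "the unique matching index, else -1"
theorem uuidToOrdinalLoop_eq (candidate : String) (l : List (Int × String))
    (hpos : ∀ p ∈ l, (0:Int) ≤ p.1) :
    uuidToOrdinalLoop candidate l (-1) =
      (if (l.filter (fun p => PySem.Str.startswith p.2 candidate)).length = 1
       then ((l.filter (fun p => PySem.Str.startswith p.2 candidate)).map (fun p => p.1)).headD 0
       else -1) := by
  induction l with
  | nil => simp [uuidToOrdinalLoop]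
  | cons p rest ih =>
    obtain ⟨idx, uuid⟩ := p
    simp only [uuidToOrdinalLoop, List.filter_cons]
    by_cases h : PySem.Str.startswith uuid candidate
    · have hidx : (0:Int) ≤ idx := hpos (idx, uuid) (by simp)
      have hne : idx ≠ -1 := by omega
      rw [h]
      rw [if_neg (by simp), if_neg (by simp), if_pos rfl,
        uuidToOrdinalLoop_of_ne candidate rest idx hne]
      by_cases hrest : rest.filter (fun p => PySem.Str.startswith p.2 candidate) = []
      · rw [if_pos hrest, hrest]
        simp
      · rw [if_neg hrest, if_neg]
        have : (rest.filter (fun p => PySem.Str.startswith p.2 candidate)).length ≠ 0 :=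
          fun hc => hrest (List.length_eq_zero_iff.mp hc)
        simp only [List.length_cons]
        omega
    · rw [Bool.not_eq_true] at h
      rw [h]
      simp only [Bool.not_false, Bool.false_eq_true, if_true, if_false]
      exact ih (fun q hq => hpos q (by simp [hq]))

-- enumerate indices are nonnegative
theorem enumerate_fst_nonneg (uuids : List String) (p : Int × String)
    (hp : p ∈ PySem.List.enumerate uuids 0) : (0:Int) ≤ p.1 := by
  rw [PySem.List.mem_enumerate_iff] at hp
  obtain ⟨k, hk, rfl⟩ := hp
  simp

-- ----- binary-search (bisect_left) spec on sorted string lists -----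

theorem bisectLoopB_spec (xs : List String) (x : String)
    (hsort : xs.Pairwise (· ≤ ·)) :
    ∀ (fuel lo hi : Nat), lo ≤ hi → hi ≤ xs.length → hi - lo ≤ fuel →
    (∀ j (hj : j < xs.length), j < lo → xs[j] < x) →
    (∀ j (hj : j < xs.length), hi ≤ j → x ≤ xs[j]) →
    (bisectLoopB xs x fuel lo hi ≤ xs.length ∧
     (∀ j (hj : j < xs.length), j < bisectLoopB xs x fuel lo hi → xs[j] < x) ∧
     (∀ j (hj : j < xs.length), bisectLoopB xs x fuel lo hi ≤ j → x ≤ xs[j])) := by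
  rw [List.pairwise_iff_getElem] at hsort
  intro fuel
  induction fuel with
  | zero =>
    intro lo hi hlh hhl hfuel hpre hpost
    have hb : bisectLoopB xs x 0 lo hi = lo := rfl
    rw [hb]
    exact ⟨by omega, hpre, fun j hj hle => hpost j hj (by omega)⟩
  | succ n ih =>
    intro lo hi hlh hhl hfuel hpre hpost
    show (bisectLoopB xs x (n+1) lo hi ≤ _ ∧ _)
    rw [bisectLoopB]
    by_cases hlt : lo < hi
    · rw [if_pos hlt]
      have hmlt : (lo + hi) / 2 < hi := by omega
      have hmge : lo ≤ (lo + hi) / 2 := by omega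
      have hmlen : (lo + hi) / 2 < xs.length := by omega
      rw [List.getD_eq_getElem xs "" hmlen]
      by_cases hy : xs[(lo + hi) / 2] < x
      · rw [if_pos hy]
        apply ih ((lo + hi) / 2 + 1) hi (by omega) hhl (by omega) ?_ hpost
        intro j hj hjlt
        rcases lt_or_ge j lo with h | h
        · exact hpre j hj h
        · rcases eq_or_lt_of_le (show j ≤ (lo + hi) / 2 by omega) with heq | hlt2
          · subst heq; exact hy
          · exact lt_of_le_of_lt (hsort j _ hj hmlen hlt2) hy
      · rw [if_neg hy]
        apply ih lo ((lo + hi) / 2) hmge (by omega) (by omega) hpre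
        intro j hj hjge
        rcases lt_or_ge j hi with h | h
        · rcases eq_or_lt_of_le hjge with heq | hlt2
          · subst heq; exact not_lt.mp hy
          · exact le_trans (not_lt.mp hy) (hsort _ j hmlen hj hlt2)
        · exact hpost j hj h
    · rw [if_neg hlt]
      exact ⟨by omega, hpre, fun j hj hle => hpost j hj (by omega)⟩

theorem bisectB_spec (keys : List String) (x : String) (hsort : keys.Pairwise (· ≤ ·)) :
    (bisectB keys x ≤ keys.length ∧
     (∀ j (hj : j < keys.length), j < bisectB keys x → keys[j] < x) ∧
     (∀ j (hj : j < keys.length), bisectB keys x ≤ j → x ≤ keys[j])) := by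
  unfold bisectB
  exact bisectLoopB_spec keys x hsort keys.length 0 keys.length (Nat.zero_le _) le_rfl
    (by omega) (fun j hj h => absurd h (by omega)) (fun j hj h => absurd hj (by omega))

-- ----- the order/prefix characterisation -----

-- Mathlib's < on List Char is lexicographic
theorem charlist_lt_iff (l m : List Char) : l < m ↔ List.Lex (· < ·) l m := Iff.rfl

-- on 7-bit strings: k starts with c  iff  c ≤ k < c ++ chr(127)
theorem prefix_of_between (c : List Char) : ∀ (k : List Char), ¬ k < c → k < c ++ ['\x7F'] →
    c <+: k := by
  induction c with
  | nil => intro k _ _; exact List.nil_prefix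
  | cons b c' ih =>
    intro k h1 h2
    cases k with
    | nil => exact absurd (List.nil_lt_cons b c') h1
    | cons a k' =>
      rw [charlist_lt_iff] at h2
      cases h2 with
      | rel hab =>
        exact absurd ((charlist_lt_iff _ _).mpr (List.Lex.rel hab)) h1
      | cons htail =>
        rw [List.cons_prefix_cons]
        refine ⟨rfl, ih k' (fun hh => h1 ((charlist_lt_iff _ _).mpr
          (List.Lex.cons ((charlist_lt_iff _ _).mp hh)))) ((charlist_lt_iff _ _).mpr htail)⟩

theorem between_of_prefix (c : List Char) : ∀ (k : List Char),
    (∀ ch ∈ k, ch.toNat < 127) → c <+: k → ¬ k < c ∧ k < c ++ ['\x7F'] := by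
  induction c with
  | nil =>
    intro k hk _
    constructor
    · intro h
      have h' := (charlist_lt_iff _ _).mp h
      cases h'
    cases k with
    | nil => exact List.nil_lt_cons _ _
    | cons a k' =>
      rw [charlist_lt_iff]
      refine List.Lex.rel ?_
      have ha := hk a (by simp)
      have h127 : ('\x7F').val.toNat = 127 := by decide
      rw [Char.lt_def, UInt32.lt_iff_toNat_lt, h127]
      exact ha
  | cons b c' ih =>
    intro k hk h
    obtain ⟨t, rfl⟩ := h
    have hpre : c' <+: c' ++ t := ⟨t, rfl⟩
    obtain ⟨ih1, ih2⟩ := ih (c' ++ t)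
      (fun ch hch => hk ch (List.mem_cons_of_mem b hch)) hpre
    rw [List.cons_append]
    constructor
    · intro hh
      rw [charlist_lt_iff] at hh
      rw [List.lex_cons_iff] at hh
      exact ih1 ((charlist_lt_iff _ _).mpr hh)
    · rw [charlist_lt_iff, List.cons_append]
      exact List.Lex.cons ((charlist_lt_iff _ _).mp ih2)

theorem lt_append_singleton (x : Char) : ∀ (l : List Char), l < l ++ [x] := by
  intro l
  induction l with
  | nil => exact List.nil_lt_cons x []
  | cons a t ih => exact (charlist_lt_iff _ _).mpr (List.Lex.cons ((charlist_lt_iff _ _).mp ih))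

-- counting inside a window: if p holds exactly on positions lo ≤ j < hi, countP = hi - lo
theorem countP_window {α : Type} (p : α → Bool) :
    ∀ (xs : List α) (lo hi : Nat), lo ≤ hi → hi ≤ xs.length →
    (∀ j (hj : j < xs.length), p xs[j] = true ↔ (lo ≤ j ∧ j < hi)) →
    xs.countP p = hi - lo := by
  intro xs
  induction xs with
  | nil => intro lo hi hlo hhi h; simp at hhi ⊢; omega
  | cons a t iht =>
    intro lo hi hlo hhi h
    have hhead := h 0 (by simp)
    simp only [List.getElem_cons_zero] at hhead
    have hlen : hi ≤ t.length + 1 := by simpa using hhi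
    match hlo' : lo, hhi' : hi with
    | 0, 0 =>
      have ha : p a = false := by
        by_contra hf
        rw [Bool.not_eq_false] at hf
        exact absurd (hhead.mp hf) (by omega)
      have ht0 : t.countP p = 0 - 0 := by
        apply iht 0 0 le_rfl (Nat.zero_le _)
        intro j hj
        have := h (j + 1) (by simp; omega)
        simp only [List.getElem_cons_succ] at this
        rw [this]; omega
      simp [ha, ht0]
    | 0, m + 1 =>
      have ha : p a = true := hhead.mpr (by omega)
      have htc : t.countP p = m - 0 := by
        apply iht 0 m (Nat.zero_le _) (by omega)
        intro j hj
        have := h (j + 1) (by simp; omega)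
        simp only [List.getElem_cons_succ] at this
        rw [this]; omega
      simp [ha, htc]
    | n + 1, hi =>
      have ha : p a = false := by
        by_contra hf
        rw [Bool.not_eq_false] at hf
        exact absurd (hhead.mp hf) (by omega)
      have htc : t.countP p = (hi - 1) - n := by
        apply iht n (hi - 1) (by omega) (by omega)
        intro j hj
        have := h (j + 1) (by simp; omega)
        simp only [List.getElem_cons_succ] at this
        rw [this]; omega
      simp only [List.countP_cons, ha, Bool.false_eq_true, if_false]
      omega

-- ----- the per-candidate bridge -----

-- proof-side names for B's sorted index
def pairsOf (uuids : List String) : List (Int × String) :=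
  PySem.List.sorted (PySem.List.enumerate uuids 0) (fun p => p.2) false

def keysOf (uuids : List String) : List String := (pairsOf uuids).map (fun p => p.2)

def matchP (c : String) : Int × String → Bool := fun p => PySem.Str.startswith p.2 c

theorem bridge (uuids : List String) (c : String)
    (hdom : ∀ u ∈ uuids, ∀ ch ∈ u.toList, ch.toNat < 127) :
    bisectB (keysOf uuids) c ≤ bisectB (keysOf uuids) (c ++ "\x7F") ∧
    bisectB (keysOf uuids) (c ++ "\x7F") ≤ (keysOf uuids).length ∧
    ((PySem.List.enumerate uuids 0).filter (matchP c)).length =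
      bisectB (keysOf uuids) (c ++ "\x7F") - bisectB (keysOf uuids) c ∧
    (bisectB (keysOf uuids) (c ++ "\x7F") - bisectB (keysOf uuids) c = 1 →
      ((PySem.List.enumerate uuids 0).filter (matchP c)).map (fun p => p.1) =
        [((pairsOf uuids).getD (bisectB (keysOf uuids) c) ((0:Int), "")).1]) := by
  have hx7 : ("\x7F" : String).toList = ['\x7F'] := by decide
  have hsortp : (pairsOf uuids).Pairwise (fun a b => a.2 ≤ b.2) :=
    PySem.List.sorted_pairwise _ _
  have hsort : (keysOf uuids).Pairwise (· ≤ ·) := List.pairwise_map.mpr hsortp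
  have hperm : (pairsOf uuids).Perm (PySem.List.enumerate uuids 0) :=
    PySem.List.sorted_perm _ _ _
  have hmemuu : ∀ p ∈ pairsOf uuids, p.2 ∈ uuids := by
    intro p hp
    have hmem : p ∈ PySem.List.enumerate uuids 0 := hperm.mem_iff.mp hp
    rw [PySem.List.mem_enumerate_iff] at hmem
    obtain ⟨k, hk, rfl⟩ := hmem
    exact List.getElem_mem _
  have hkchars : ∀ j (hj : j < (keysOf uuids).length), ∀ ch ∈ (keysOf uuids)[j].toList,
      ch.toNat < 127 := by
    intro j hj ch hch
    have hmem : (keysOf uuids)[j] ∈ keysOf uuids := List.getElem_mem _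
    unfold keysOf at hmem
    rw [List.mem_map] at hmem
    obtain ⟨p, hp, hpe⟩ := hmem
    exact hdom p.2 (hmemuu p hp) ch (hpe ▸ hch)
  obtain ⟨hlo1, hlo2, hlo3⟩ := bisectB_spec (keysOf uuids) c hsort
  obtain ⟨hhi1, hhi2, hhi3⟩ := bisectB_spec (keysOf uuids) (c ++ "\x7F") hsort
  set lo := bisectB (keysOf uuids) c with hlodef
  set hi := bisectB (keysOf uuids) (c ++ "\x7F") with hhidef
  have hcchi : c < c ++ "\x7F" := by
    rw [String.lt_iff_toList_lt, String.toList_append, hx7]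
    exact lt_append_singleton _ _
  have hlohi : lo ≤ hi := by
    by_contra hcon
    rw [not_le] at hcon
    have hhl : hi < (keysOf uuids).length := lt_of_lt_of_le hcon hlo1
    have hlt1 := hlo2 hi hhl hcon
    have hle2 := hhi3 hi hhl le_rfl
    exact absurd (lt_trans (lt_of_le_of_lt hle2 hlt1) hcchi) (lt_irrefl _)
  -- the window characterisation
  have hwin : ∀ j (hj : j < (keysOf uuids).length),
      PySem.Str.startswith (keysOf uuids)[j] c = true ↔ (lo ≤ j ∧ j < hi) := by
    intro j hj
    constructor
    · intro hs
      rw [PySem.Str.startswith_eq, PySem.Chars.startswith_iff] at hs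
      obtain ⟨hb1, hb2⟩ := between_of_prefix c.toList (keysOf uuids)[j].toList
        (hkchars j hj) hs
      constructor
      · by_contra hcon
        rw [not_le] at hcon
        exact hb1 (String.lt_iff_toList_lt.mp (hlo2 j hj hcon))
      · by_contra hcon
        rw [not_lt] at hcon
        have hle := hhi3 j hj hcon
        rw [String.le_iff_toList_le, String.toList_append, hx7] at hle
        exact absurd hb2 (not_lt.mpr hle)
    · rintro ⟨hj1, hj2⟩
      have hle1 : c ≤ (keysOf uuids)[j] := hlo3 j hj hj1
      have hlt2 : (keysOf uuids)[j] < c ++ "\x7F" := hhi2 j hj hj2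
      rw [String.le_iff_toList_le] at hle1
      rw [String.lt_iff_toList_lt, String.toList_append, hx7] at hlt2
      rw [PySem.Str.startswith_eq, PySem.Chars.startswith_iff]
      exact prefix_of_between c.toList _ (not_lt.mpr hle1) hlt2
  -- counting
  have hcntkeys : (keysOf uuids).countP (fun k => PySem.Str.startswith k c) = hi - lo := by
    apply countP_window _ _ lo hi hlohi hhi1
    intro j hj
    exact hwin j hj
  have hcntpairs : (pairsOf uuids).countP (matchP c) = hi - lo := by
    rw [← hcntkeys]
    unfold keysOf
    rw [List.countP_map]
    rfl
  have hcntenum : ((PySem.List.enumerate uuids 0).filter (matchP c)).length = hi - lo := by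
    rw [← List.countP_eq_length_filter, ← hperm.countP_eq, hcntpairs]
  refine ⟨hlohi, hhi1, hcntenum, ?_⟩
  -- unique case
  intro hone
  have hlolen : lo < (keysOf uuids).length := by omega
  have hlolen' : lo < (pairsOf uuids).length := by
    have hlk : (keysOf uuids).length = (pairsOf uuids).length := by
      unfold keysOf; rw [List.length_map]
    omega
  have hplo : matchP c (pairsOf uuids)[lo] = true := by
    have hw := (hwin lo hlolen).mpr ⟨le_rfl, by omega⟩
    have hk : (keysOf uuids)[lo] = (pairsOf uuids)[lo].2 := by
      unfold keysOf
      exact List.getElem_map _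
    rw [hk] at hw
    exact hw
  have hflen : ((pairsOf uuids).filter (matchP c)).length = 1 := by
    rw [← List.countP_eq_length_filter, hcntpairs, hone]
  obtain ⟨y, hy⟩ := List.length_eq_one_iff.mp hflen
  have hmemf : (pairsOf uuids)[lo] ∈ (pairsOf uuids).filter (matchP c) :=
    List.mem_filter.mpr ⟨List.getElem_mem _, hplo⟩
  rw [hy, List.mem_singleton] at hmemf
  have hfpairs : (pairsOf uuids).filter (matchP c) = [(pairsOf uuids)[lo]] := by
    rw [hy, hmemf]
  have hfenum : (PySem.List.enumerate uuids 0).filter (matchP c) = [(pairsOf uuids)[lo]] := by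
    have hpf := hperm.filter (matchP c)
    rw [hfpairs] at hpf
    exact List.perm_singleton.mp hpf.symm
  rw [hfenum, List.getD_eq_getElem _ _ hlolen']
  rfl

-- ----- outer loops agree -----

theorem loops_agree (uuids : List String) (cs : List String)
    (hdom : ∀ u ∈ uuids, ∀ ch ∈ u.toList, ch.toNat < 127) :
    ∀ (rc : List Int),
    transformLoopA uuids cs rc = loopB (pairsOf uuids) (keysOf uuids) cs rc := by
  induction cs with
  | nil => intro rc; rfl
  | cons c rest ih =>
    intro rc
    obtain ⟨h1, h2, h3, h4⟩ := bridge uuids c hdom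
    simp only [transformLoopA, loopB]
    rw [uuidToOrdinalLoop_eq c _ (enumerate_fst_nonneg uuids)]
    set lo := bisectB (keysOf uuids) c with hlodef
    set hi := bisectB (keysOf uuids) (c ++ "\x7F") with hhidef
    have hfil : ((PySem.List.enumerate uuids 0).filter
        (fun p => PySem.Str.startswith p.2 c)) =
        ((PySem.List.enumerate uuids 0).filter (matchP c)) := rfl
    rw [hfil]
    by_cases hone : hi - lo = 1
    · have hlen1 : ((PySem.List.enumerate uuids 0).filter (matchP c)).length = 1 := by
        rw [h3, hone]
      have hmap := h4 hone
      rw [if_pos hlen1, hmap]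
      simp only [List.headD_cons]
      set idx := ((pairsOf uuids).getD lo ((0:Int), "")).1 with hidxdef
      have hidxpos : (0:Int) ≤ idx := by
        obtain ⟨y, hy⟩ := List.length_eq_one_iff.mp hlen1
        have hymem : y ∈ (PySem.List.enumerate uuids 0).filter (matchP c) := by
          rw [hy]; exact List.mem_singleton.mpr rfl
        have hyen : y ∈ PySem.List.enumerate uuids 0 := List.mem_of_mem_filter hymem
        have hpos := enumerate_fst_nonneg uuids y hyen
        have hidy : idx = y.1 := by
          rw [hy] at hmap
          simpa using hmap.symm
        omega
      rw [if_neg (not_lt.mpr hidxpos),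
        if_neg (show ¬((hi:Int) - (lo:Int) ≠ 1) by omega)]
      by_cases hmem : rc.contains idx
      · rw [if_pos hmem, if_pos hmem]
      · rw [if_neg hmem, if_neg hmem]
        exact ih (rc ++ [idx])
    · have hlenne : ((PySem.List.enumerate uuids 0).filter (matchP c)).length ≠ 1 := by
        rw [h3]; exact hone
      rw [if_neg hlenne, if_pos (show (-1:Int) < 0 by norm_num),
        if_pos (show ((hi:Int) - (lo:Int) ≠ 1) by omega)]

-- ===== VERDICT (by name: the statement is the Claim_ definition above) =====
theorem transform_uuid_to_ordinals_py_spec : Claim_equal_transform_uuid_to_ordinals_py := by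
  intro candidates uuids hdom
  unfold Spec_transform_uuid_to_ordinals_py transform_uuid_to_ordinals_py
    transform_uuid_to_ordinals_py_alt
  have hchars : ∀ u ∈ uuids, ∀ ch ∈ u.toList, ch.toNat < 127 := by
    intro u hu ch hch
    unfold Dom_transform_uuid_to_ordinals_py at hdom
    simp only [Bool.and_eq_true, List.all_eq_true] at hdom
    have h1 := hdom.2 u hu
    unfold pvDomStr at h1
    rw [List.all_eq_true] at h1
    have h2 := h1 ch hch
    unfold pvDomChar at h2
    simp only [Bool.or_eq_true, Bool.and_eq_true, decide_eq_true_eq, beq_iff_eq] at h2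
    omega
  exact loops_agree uuids candidates hchars []
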